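-- pv_equiv track=rewrite | github.com/zhengyi-yang/Web-Economics-Project | src/svm.py | get_total_spend
-- ===== SOURCE A (Python) =====
-- def get_total_spend(payprices, bidprices, budget=6250):
--     """ Calculate the total spend, cap at the budget price."""
--     total = 0
--     for pp, bp in zip(payprices, bidprices):
--         if bp > pp:
--             total += pp
--         if total > budget*1000:
--             break
--     return total // 1000
-- ===== SOURCE B (Python) =====
-- def get_total_spend(payprices, bidprices, budget=6250):
--     """ Calculate the total spend, cap at the budget price."""
--     cap = budget * 1000
--     contribs = [pp if bp > pp else 0 for pp, bp in zip(payprices, bidprices)]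
--     totals = []
--     s = 0
--     for c in contribs:
--         s += c
--         totals.append(s)
--     spent = next((t for t in totals if t > cap), totals[-1] if totals else 0)
--     return spent // 1000
-- ===== Notes on version B (the rewrite author's own statement) =====
-- stated objective: alternative
-- what changed: Replaced A's single fused loop (conditional add plus break) with a staged pipeline: map each row to its contribution (payprice if winning else 0), build the explicit prefix-sum list, then select the first prefix sum exceeding budget*1000 (else the last, or 0), dividing by 1000 at the end.
import Mathlib
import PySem

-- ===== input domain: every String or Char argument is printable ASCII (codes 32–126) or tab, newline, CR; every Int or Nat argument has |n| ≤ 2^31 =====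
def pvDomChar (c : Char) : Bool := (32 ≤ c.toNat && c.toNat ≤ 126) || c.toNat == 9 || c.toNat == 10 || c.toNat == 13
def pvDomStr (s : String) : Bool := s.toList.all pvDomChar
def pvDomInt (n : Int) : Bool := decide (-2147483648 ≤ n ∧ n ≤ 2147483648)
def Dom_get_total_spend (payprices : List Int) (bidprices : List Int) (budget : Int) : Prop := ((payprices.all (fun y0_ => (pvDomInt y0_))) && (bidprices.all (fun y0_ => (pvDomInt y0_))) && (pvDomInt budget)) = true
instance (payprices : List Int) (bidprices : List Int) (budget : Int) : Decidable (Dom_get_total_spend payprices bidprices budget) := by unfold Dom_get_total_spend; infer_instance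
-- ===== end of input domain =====

-- B restructures A's fused loop-with-break into staged map / prefix-sums / first-exceeding selection (objective: alternative decomposition).


-- ===== PORT A =====
-- A's loop: update total, then break as soon as total > budget*1000
def pvLoopA (cap : Int) : List (Int × Int) → Int → Int
  | [], total => total
  | (pp, bp) :: rest, total =>
    let t := if bp > pp then total + pp else total
    if t > cap then t else pvLoopA cap rest t

def get_total_spend (payprices : List Int) (bidprices : List Int) (budget : Int) : Int :=
  PySem.Int.floordiv (pvLoopA (budget * 1000) (payprices.zip bidprices) 0) 1000

-- ===== PORT B =====
-- prefix sums starting from s (the manual accumulate loop of Source B)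
def pvAccumFrom : Int → List Int → List Int
  | _, [] => []
  | s, c :: cs => (s + c) :: pvAccumFrom (s + c) cs

def get_total_spend_alt (payprices : List Int) (bidprices : List Int) (budget : Int) : Int :=
  let cap := budget * 1000
  let contribs := (payprices.zip bidprices).map (fun pb => if pb.2 > pb.1 then pb.1 else 0)
  let totals := pvAccumFrom 0 contribs
  let spent :=
    match totals.find? (fun t => decide (t > cap)) with
    | some t => t
    | none => totals.getLast?.getD 0
  PySem.Int.floordiv spent 1000

-- ===== PRECONDITION & SPEC =====
def Spec_get_total_spend (payprices : List Int) (bidprices : List Int) (budget : Int) (out : Int) : Prop := out = get_total_spend_alt payprices bidprices budget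
instance (payprices : List Int) (bidprices : List Int) (budget : Int) (out : Int) : Decidable (Spec_get_total_spend payprices bidprices budget out) := by unfold Spec_get_total_spend; infer_instance

-- ===== CLAIM (what is proved, stated in full; the proofs are below) =====
def Claim_equal_get_total_spend : Prop := ∀ (payprices : List Int) (bidprices : List Int) (budget : Int), Dom_get_total_spend payprices bidprices budget → Spec_get_total_spend payprices bidprices budget (get_total_spend payprices bidprices budget)

-- ===== LEMMAS AND PROOFS =====

theorem getLast?_getD_cons (a : Int) (l : List Int) (d : Int) :
    ((a :: l).getLast?.getD d) = l.getLast?.getD a := by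
  cases l with
  | nil => rfl
  | cons b t =>
    rw [List.getLast?_cons_cons]
    cases h : (b :: t).getLast? with
    | none => simp at h
    | some v => rfl

-- loop invariant: A's loop from state `total` equals B's selection over prefix sums started at `total`
theorem pvLoop_eq (cap : Int) (l : List (Int × Int)) :
    ∀ total : Int,
      pvLoopA cap l total =
        (match (pvAccumFrom total (l.map (fun pb => if pb.2 > pb.1 then pb.1 else 0))).find?
              (fun t => decide (t > cap)) with
         | some t => t
         | none => (pvAccumFrom total (l.map (fun pb => if pb.2 > pb.1 then pb.1 else 0))).getLast?.getD total) := by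
  induction l with
  | nil => intro total; simp [pvLoopA, pvAccumFrom]
  | cons hd rest ih =>
    intro total
    obtain ⟨pp, bp⟩ := hd
    have hstep : (if bp > pp then total + pp else total)
        = total + (if bp > pp then pp else 0) := by split <;> simp
    simp only [pvLoopA, List.map_cons, pvAccumFrom, List.find?_cons]
    rw [hstep]
    set t := total + (if bp > pp then pp else 0) with ht
    by_cases h : t > cap
    · simp [h]
    · simp only [h]
      rw [ih t]
      cases hf : (pvAccumFrom t (rest.map (fun pb => if pb.2 > pb.1 then pb.1 else 0))).find?
          (fun x => decide (x > cap)) with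
      | some v => simp
      | none => simp [getLast?_getD_cons]

-- ===== VERDICT (by name: the statement is the Claim_ definition above) =====
theorem get_total_spend_spec : Claim_equal_get_total_spend := by
  intro payprices bidprices budget _
  unfold Spec_get_total_spend get_total_spend get_total_spend_alt
  rw [pvLoop_eq]
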